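-- pv_equiv track=rewrite | github.com/JapanSG/i-judge | Week7/Solar System.py | get_sun_index
-- ===== SOURCE A (Python) =====
-- def get_sun_index(solar : str) -> int:
--     '''return the location of the sun'''
--     index = 0
--     string = ""
--     for i in solar:
--         if string == "Sun" and i.isspace():
--             return index
--         if i.isspace():
--             index += 1
--             string = ""
--             continue
--         string += i
--     return index
-- ===== SOURCE B (Python) =====
-- def get_sun_index(solar: str) -> int:
--     '''return the location of the sun'''
--     words = ['']
--     for ch in solar:
--         if ch.isspace():
--             words.append('')
--         else:
--             words[-1] += ch
--     return words.index('Sun') if 'Sun' in words else len(words) - 1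
-- ===== Notes on version B (the rewrite author's own statement) =====
-- stated objective: simpler
-- what changed: B first tokenizes the string into a materialized word list (splitting on every whitespace char, keeping empty tokens) and then searches it with list.index, replacing A's interleaved scan-with-early-return and mutable word buffer.
import Mathlib
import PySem

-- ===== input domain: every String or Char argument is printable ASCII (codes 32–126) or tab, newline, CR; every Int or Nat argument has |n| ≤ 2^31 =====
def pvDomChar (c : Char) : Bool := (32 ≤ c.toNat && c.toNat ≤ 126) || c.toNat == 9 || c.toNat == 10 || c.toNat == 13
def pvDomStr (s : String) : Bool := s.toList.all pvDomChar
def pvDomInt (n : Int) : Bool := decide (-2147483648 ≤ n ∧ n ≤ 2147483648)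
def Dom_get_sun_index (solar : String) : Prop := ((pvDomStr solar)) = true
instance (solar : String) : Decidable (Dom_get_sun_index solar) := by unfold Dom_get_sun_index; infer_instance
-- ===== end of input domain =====

-- B tokenizes the whole string into a word list first, then searches it; A scans once with
-- an early return.  Equivalence of the two is proved for every input (no Pre_ needed).

-- ===== PORT A =====
-- literal port of A's loop: state = (index, current word as List Char)
def pvSunLoop : List Char → Int → List Char → Int
  | [], index, _ => index
  | c :: rest, index, string =>
    if string = ['S', 'u', 'n'] ∧ PySem.Chars.isspace c = true then index
    else if PySem.Chars.isspace c then pvSunLoop rest (index + 1) []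
    else pvSunLoop rest index (string ++ [c])

def get_sun_index (solar : String) : Int := pvSunLoop solar.toList 0 []

-- ===== PORT B =====
-- words[-1] += ch : extend the last element of the word list
def pvAppendLast : List (List Char) → Char → List (List Char)
  | [], c => [[c]]
  | [w], c => [w ++ [c]]
  | w :: ws, c => w :: pvAppendLast ws c

def get_sun_index_alt (solar : String) : Int :=
  let words := solar.toList.foldl
    (fun ws ch => if PySem.Chars.isspace ch then ws ++ [[]] else pvAppendLast ws ch) [[]]
  match PySem.List.index? words ['S', 'u', 'n'] with
  | some i => (i : Int)
  | none => (words.length : Int) - 1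

-- ===== PRECONDITION & SPEC =====
def Spec_get_sun_index (solar : String) (out : Int) : Prop := out = get_sun_index_alt solar
instance (solar : String) (out : Int) : Decidable (Spec_get_sun_index solar out) := by unfold Spec_get_sun_index; infer_instance

-- ===== CLAIM (what is proved, stated in full; the proofs are below) =====
def Claim_equal_get_sun_index : Prop := ∀ (solar : String), Dom_get_sun_index solar → Spec_get_sun_index solar (get_sun_index solar)

-- ===== LEMMAS AND PROOFS =====

-- proof-side tokenizer: (first token, remaining tokens) of cs split on whitespace
def pvTok : List Char → List Char × List (List Char)
  | [] => ([], [])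
  | c :: rest =>
    let p := pvTok rest
    if PySem.Chars.isspace c then ([], p.1 :: p.2) else (c :: p.1, p.2)

theorem pvAppendLast_snoc (done : List (List Char)) (cur : List Char) (c : Char) :
    pvAppendLast (done ++ [cur]) c = done ++ [cur ++ [c]] := by
  induction done with
  | nil => rfl
  | cons w ws ih =>
    cases ws with
    | nil => simp [pvAppendLast]
    | cons w' ws' => simpa [pvAppendLast] using ih

-- the forward fold of B builds exactly the tokens of pvTok
theorem pvFold_eq_tok (cs : List Char) (done : List (List Char)) (cur : List Char) :
    cs.foldl (fun ws ch => if PySem.Chars.isspace ch then ws ++ [[]] else pvAppendLast ws ch)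
      (done ++ [cur])
      = done ++ ((cur ++ (pvTok cs).1) :: (pvTok cs).2) := by
  induction cs generalizing done cur with
  | nil => simp [pvTok]
  | cons c rest ih =>
    by_cases hs : PySem.Chars.isspace c
    · rw [List.foldl_cons, if_pos hs]
      rw [show (done ++ [cur]) ++ [[]] = (done ++ [cur]) ++ [([] : List Char)] from rfl]
      rw [ih (done ++ [cur]) []]
      simp [pvTok, hs]
    · rw [List.foldl_cons, if_neg hs, pvAppendLast_snoc, ih done (cur ++ [c])]
      simp [pvTok, hs]

-- characterisation of A's loop by the token list
theorem pvSunLoop_eq (cs : List Char) (index : Int) (cur : List Char) :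
    pvSunLoop cs index cur =
      match PySem.List.index? ((cur ++ (pvTok cs).1) :: (pvTok cs).2) ['S', 'u', 'n'] with
      | some i => index + (i : Int)
      | none => index + ((pvTok cs).2.length : Int) := by
  induction cs generalizing index cur with
  | nil =>
    simp only [pvSunLoop, pvTok, List.append_nil, List.length_nil]
    by_cases h : cur = ['S', 'u', 'n']
    · simp [h]
    · rw [show PySem.List.index? [cur] ['S', 'u', 'n'] = none from by
        simp [h]]
      simp
  | cons c rest ih =>
    by_cases hs : PySem.Chars.isspace c
    · have htok : pvTok (c :: rest) = ([], (pvTok rest).1 :: (pvTok rest).2) := by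
        simp [pvTok, hs]
      by_cases h : cur = ['S', 'u', 'n']
      · have hA : pvSunLoop (c :: rest) index cur = index := by
          simp [pvSunLoop, h, hs]
        rw [hA, htok, h]
        rw [show (['S', 'u', 'n'] ++ ([] : List Char)) = ['S', 'u', 'n'] from rfl]
        rw [PySem.List.index?_cons_self]
        simp
      · have hA : pvSunLoop (c :: rest) index cur = pvSunLoop rest (index + 1) [] := by
          simp [pvSunLoop, h, hs]
        rw [hA, ih (index + 1) [], htok]
        rw [show cur ++ ([] : List Char) = cur from by simp]
        rw [List.nil_append, PySem.List.index?_cons_of_ne _ h]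
        cases hi : PySem.List.index? ((pvTok rest).1 :: (pvTok rest).2) ['S', 'u', 'n'] with
        | none => simp only [Option.map_none]; push_cast [List.length_cons]; ring
        | some i => simp only [Option.map_some]; push_cast; ring
    · have htok1 : (pvTok (c :: rest)).1 = c :: (pvTok rest).1 := by simp [pvTok, hs]
      have htok2 : (pvTok (c :: rest)).2 = (pvTok rest).2 := by simp [pvTok, hs]
      have hA : pvSunLoop (c :: rest) index cur = pvSunLoop rest index (cur ++ [c]) := by
        simp [pvSunLoop, hs]
      rw [hA, ih index (cur ++ [c]), htok1, htok2, List.append_assoc, List.singleton_append]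

-- ===== VERDICT (by name: the statement is the Claim_ definition above) =====
theorem get_sun_index_spec : Claim_equal_get_sun_index := by
  intro solar _
  unfold Spec_get_sun_index get_sun_index get_sun_index_alt
  have hw := pvFold_eq_tok solar.toList [] []
  simp only [List.nil_append] at hw
  rw [hw, pvSunLoop_eq]
  cases hi : PySem.List.index? (((pvTok solar.toList).1) :: (pvTok solar.toList).2) ['S', 'u', 'n'] with
  | none =>
    rw [PySem.List.index?_eq_idxOf?] at hi
    simp [hi]
    try omega
  | some i =>
    rw [PySem.List.index?_eq_idxOf?] at hi
    simp [hi]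
    try omega
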